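-- pv_equiv track=rewrite | github.com/rohit051989/OpenAIAgents | KG/execution_cpm_analyzer_v3.py | _reachable_from_entries
-- ===== SOURCE A (Python) =====
-- from typing import Dict, List, Tuple, Set, Optional, Any
-- from collections import defaultdict, deque
--
-- def _reachable_from_entries(entry_ids: List[str], succ: Dict[str, List[str]]) -> Set[str]:
--     seen: Set[str] = set()
--     dq = deque(entry_ids)
--     while dq:
--         n = dq.popleft()
--         if n in seen:
--             continue
--         seen.add(n)
--         for s in succ.get(n, []):
--             if s not in seen:
--                 dq.append(s)
--     return seen
-- ===== SOURCE B (Python) =====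
-- def _reachable_from_entries(entry_ids, succ):
--     # Round-based fixpoint closure: repeatedly sweep the whole successor map,
--     # absorbing the successors of every already-reached key, until a sweep adds nothing.
--     seen = set(entry_ids)
--     while True:
--         grown = set(seen)
--         for k, vs in succ.items():
--             if k in grown:
--                 grown.update(vs)
--         if len(grown) == len(seen):
--             return seen
--         seen = grown
-- ===== Notes on version B (the rewrite author's own statement) =====
-- stated objective: alternative
-- what changed: Replaces the BFS worklist (deque of pending nodes, pop/append) by a round-based fixpoint closure: start from set(entry_ids) and repeatedly sweep the whole successor map, absorbing the successors of every already-reached key, until a full sweep adds nothing; Pre_ only excludes Lean association lists with duplicate keys, which no Python dict can represent.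
import Mathlib
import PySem

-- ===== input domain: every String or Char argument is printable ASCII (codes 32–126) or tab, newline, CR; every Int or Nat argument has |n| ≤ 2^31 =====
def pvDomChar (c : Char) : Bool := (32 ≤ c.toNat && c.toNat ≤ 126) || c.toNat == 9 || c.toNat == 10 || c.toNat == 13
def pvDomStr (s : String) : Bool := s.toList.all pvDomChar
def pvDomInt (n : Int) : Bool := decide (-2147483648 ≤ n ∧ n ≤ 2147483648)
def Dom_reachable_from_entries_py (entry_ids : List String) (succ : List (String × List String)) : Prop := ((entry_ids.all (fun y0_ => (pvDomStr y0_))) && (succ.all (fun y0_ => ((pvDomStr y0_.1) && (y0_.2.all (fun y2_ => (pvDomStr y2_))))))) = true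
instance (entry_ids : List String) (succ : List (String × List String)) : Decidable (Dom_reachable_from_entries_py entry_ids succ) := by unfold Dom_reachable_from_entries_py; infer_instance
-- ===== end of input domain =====

-- B replaces A's BFS worklist (deque, pop/append) by a round-based fixpoint closure over the whole
-- successor map (alternative algorithm, not faster). The Python value is a SET (no defined iteration
-- order): both ports render it as its sorted list of elements.

-- ===== PORT A =====
-- lemmas cited only by the termination measures (decreasing_by) of the loops below
theorem pvFilter_mono (F s s' : List String) (h : ∀ x, x ∈ s → x ∈ s') :
    (F.filter (fun y => !(PySem.Set.contains s' y))).length ≤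
      (F.filter (fun y => !(PySem.Set.contains s y))).length := by
  refine (List.monotone_filter_right F (fun a ha => ?_)).length_le
  simp only [Bool.not_eq_eq_eq_not, Bool.not_true, PySem.Set.contains] at ha ⊢
  simp only [← Bool.not_eq_true, List.contains_iff_mem] at ha ⊢
  exact fun hm => ha (h a hm)

theorem pvFilter_strict (F s s' : List String) (h : ∀ x, x ∈ s → x ∈ s')
    (x : String) (hxF : x ∈ F) (hxs : x ∉ s) (hxs' : x ∈ s') :
    (F.filter (fun y => !(PySem.Set.contains s' y))).length <
      (F.filter (fun y => !(PySem.Set.contains s y))).length := by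
  have hsub : (F.filter (fun y => !(PySem.Set.contains s' y))).Sublist
      (F.filter (fun y => !(PySem.Set.contains s y))) := by
    refine List.monotone_filter_right F (fun a ha => ?_)
    simp only [Bool.not_eq_eq_eq_not, Bool.not_true, PySem.Set.contains] at ha ⊢
    simp only [← Bool.not_eq_true, List.contains_iff_mem] at ha ⊢
    exact fun hm => ha (h a hm)
  rcases Nat.lt_or_ge (F.filter (fun y => !(PySem.Set.contains s' y))).length
      (F.filter (fun y => !(PySem.Set.contains s y))).length with hlt | hge
  · exact hlt
  · exfalso
    have heq := hsub.eq_of_length (Nat.le_antisymm hsub.length_le hge)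
    have hx1 : x ∈ F.filter (fun y => !(PySem.Set.contains s y)) := by
      simp [List.mem_filter, hxF, PySem.Set.contains, List.contains_iff_mem, hxs]
    have hx2 : x ∉ F.filter (fun y => !(PySem.Set.contains s' y)) := by
      simp [List.mem_filter, PySem.Set.contains, List.contains_iff_mem, hxs']
    rw [heq] at hx2; exact hx2 hx1

theorem pvGetD_le (succ : List (String × List String)) (n : String) :
    ((PySem.Dict.mk succ).getD n []).length ≤ (succ.flatMap Prod.snd).length := by
  rcases h : (PySem.Dict.mk succ).get? n with _ | vs
  · rw [PySem.Dict.getD_eq_get?_getD, h]; simp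
  · rw [PySem.Dict.getD_eq_get?_getD, h]
    have hm : (n, vs) ∈ succ := PySem.Dict.mem_items_of_get?_eq_some _ h
    have hv : vs ∈ succ.map Prod.snd := List.mem_map.mpr ⟨(n, vs), hm, rfl⟩
    have := (List.sublist_flatten_of_mem hv).length_le
    rw [List.flatMap_def]
    simpa using this

-- the BFS worklist loop of A (seen : set, dq : deque), line for line
def pvBfs (succ : List (String × List String)) (seen : PySem.Set String) (dq : List String) :
    PySem.Set String :=
  match dq with
  | [] => seen
  | n :: rest =>
    if PySem.Set.contains seen n then
      pvBfs succ seen rest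
    else
      pvBfs succ (PySem.Set.add seen n)
        (rest ++ ((PySem.Dict.mk succ).getD n []).filter
          (fun s => !(PySem.Set.contains (PySem.Set.add seen n) s)))
termination_by
  ((succ.flatMap Prod.snd).length + 1) *
      ((succ.map Prod.fst).filter (fun y => !(PySem.Set.contains seen y))).length + dq.length
decreasing_by
  · simp only [List.length_cons]
    exact Nat.add_lt_add_left (Nat.lt_succ_self _) _
  · rename_i hnot
    simp only [List.length_cons, List.length_append]
    by_cases hk : n ∈ succ.map Prod.fst
    · have hxs : n ∉ seen := by
        simpa [PySem.Set.contains, List.contains_iff_mem] using hnot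
      have hstrict := pvFilter_strict (succ.map Prod.fst) seen (PySem.Set.add seen n)
        (fun x hx => (PySem.Set.mem_add seen n x).mpr (Or.inl hx)) n hk hxs
        ((PySem.Set.mem_add seen n n).mpr (Or.inr rfl))
      have happ : (((PySem.Dict.mk succ).getD n []).filter
          (fun s => !(PySem.Set.contains (PySem.Set.add seen n) s))).length ≤
          (succ.flatMap Prod.snd).length :=
        le_trans (List.length_filter_le _ _) (pvGetD_le succ n)
      have hF : ((succ.map Prod.fst).filter
            (fun y => !(PySem.Set.contains (PySem.Set.add seen n) y))).length + 1 ≤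
          ((succ.map Prod.fst).filter (fun y => !(PySem.Set.contains seen y))).length := hstrict
      have h1 := Nat.mul_le_mul_left ((succ.flatMap Prod.snd).length + 1) hF
      rw [Nat.mul_add, Nat.mul_one] at h1
      linarith
    · have hc : (PySem.Dict.mk succ).contains n = false := by
        rw [PySem.Dict.contains_eq_decide_mem_keys, PySem.Dict.keys_mk]
        simpa using hk
      rw [PySem.Dict.getD_of_not_contains _ _ hc]
      simp only [List.filter_nil, List.length_nil]
      have hmono := pvFilter_mono (succ.map Prod.fst) seen (PySem.Set.add seen n)
        (fun x hx => (PySem.Set.mem_add seen n x).mpr (Or.inl hx))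
      have h1 := Nat.mul_le_mul_left ((succ.flatMap Prod.snd).length + 1) hmono
      linarith

def reachable_from_entries_py (entry_ids : List String) (succ : List (String × List String)) :
    List String :=
  PySem.List.sorted (pvBfs succ PySem.Set.empty entry_ids) (fun x => x) false

-- ===== PORT B =====
-- one sweep over the whole successor map: absorb the successors of every already-reached key
def pvSweep (pairs : List (String × List String)) (grown : PySem.Set String) : PySem.Set String :=
  pairs.foldl
    (fun acc kv => if PySem.Set.contains acc kv.1 then PySem.Set.update acc kv.2 else acc) grown

-- cited by pvFix's decreasing_by: a sweep only appends fresh successors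
theorem pvUpdate_append (seen : PySem.Set String) (vs : List String) :
    ∃ t, PySem.Set.update seen vs = seen ++ t ∧ ∀ x ∈ t, x ∉ seen ∧ x ∈ vs := by
  induction vs generalizing seen with
  | nil => exact ⟨[], by simp [PySem.Set.update]⟩
  | cons v vs ih =>
    have hstep : PySem.Set.update seen (v :: vs) = PySem.Set.update (PySem.Set.add seen v) vs := by
      simp [PySem.Set.update, List.foldl]
    by_cases hv : PySem.Set.contains seen v
    · have hadd : PySem.Set.add seen v = seen := by simp [PySem.Set.add, PySem.Set.contains] at hv ⊢; simp [hv]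
      rcases ih seen with ⟨t, ht, hp⟩
      exact ⟨t, by rw [hstep, hadd, ht], fun x hx => ⟨(hp x hx).1, List.mem_cons_of_mem _ (hp x hx).2⟩⟩
    · have hadd : PySem.Set.add seen v = seen ++ [v] := by
        simp [PySem.Set.add, PySem.Set.contains] at hv ⊢; simp [hv]
      rcases ih (seen ++ [v]) with ⟨t, ht, hp⟩
      refine ⟨v :: t, by rw [hstep, hadd, ht]; simp, fun x hx => ?_⟩
      rcases List.mem_cons.mp hx with rfl | hx'
      · exact ⟨by simpa [PySem.Set.contains, List.contains_iff_mem] using hv, List.mem_cons_self⟩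
      · have := hp x hx'
        exact ⟨fun hm => this.1 (List.mem_append.mpr (Or.inl hm)), List.mem_cons_of_mem _ this.2⟩

theorem pvSweep_append (pairs : List (String × List String)) (seen : PySem.Set String) :
    ∃ t, pvSweep pairs seen = seen ++ t ∧ ∀ x ∈ t, x ∉ seen ∧ ∃ p ∈ pairs, x ∈ p.2 := by
  induction pairs generalizing seen with
  | nil => exact ⟨[], by simp [pvSweep]⟩
  | cons kv rest ih =>
    have hstep : pvSweep (kv :: rest) seen =
        pvSweep rest (if PySem.Set.contains seen kv.1 then PySem.Set.update seen kv.2 else seen) := by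
      simp [pvSweep, List.foldl]
    by_cases hv : PySem.Set.contains seen kv.1
    · rcases pvUpdate_append seen kv.2 with ⟨t1, ht1, hp1⟩
      rcases ih (PySem.Set.update seen kv.2) with ⟨t2, ht2, hp2⟩
      refine ⟨t1 ++ t2, ?_, fun x hx => ?_⟩
      · rw [hstep, if_pos hv, ht2, ht1, List.append_assoc]
      · rcases List.mem_append.mp hx with hx1 | hx2
        · exact ⟨(hp1 x hx1).1, kv, List.mem_cons_self, (hp1 x hx1).2⟩
        · refine ⟨fun hm => (hp2 x hx2).1 (by rw [ht1]; exact List.mem_append.mpr (Or.inl hm)), ?_⟩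
          rcases (hp2 x hx2).2 with ⟨p, hp, hxp⟩
          exact ⟨p, List.mem_cons_of_mem _ hp, hxp⟩
    · rcases ih seen with ⟨t, ht, hp⟩
      refine ⟨t, by rw [hstep, if_neg hv]; exact ht, fun x hx => ?_⟩
      rcases hp x hx with ⟨h1, p, hp', hxp⟩
      exact ⟨h1, p, List.mem_cons_of_mem _ hp', hxp⟩

-- the outer while-loop of B: sweep until a sweep adds nothing
def pvFix (succ : List (String × List String)) (seen : PySem.Set String) : PySem.Set String :=
  if PySem.Set.len (pvSweep succ seen) = PySem.Set.len seen then seen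
  else pvFix succ (pvSweep succ seen)
termination_by ((succ.flatMap Prod.snd).filter (fun y => !(PySem.Set.contains seen y))).length
decreasing_by
  rename_i h
  rcases pvSweep_append succ seen with ⟨t, ht, hp⟩
  have hne : t ≠ [] := by
    intro hnil; rw [hnil, List.append_nil] at ht; exact h (by rw [ht])
  rcases List.exists_mem_of_ne_nil t hne with ⟨x, hx⟩
  rcases hp x hx with ⟨hxs, p, hpm, hxp⟩
  exact pvFilter_strict _ seen (pvSweep succ seen)
    (fun y hy => by rw [ht]; exact List.mem_append.mpr (Or.inl hy))
    x (List.mem_flatMap.mpr ⟨p, hpm, hxp⟩) hxs (by rw [ht]; exact List.mem_append.mpr (Or.inr hx))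

def reachable_from_entries_py_alt (entry_ids : List String) (succ : List (String × List String)) :
    List String :=
  PySem.List.sorted (pvFix succ (PySem.Set.ofList entry_ids)) (fun x => x) false

-- ===== PRECONDITION & SPEC =====
-- Pre_ excludes only association lists with duplicate keys: the succ argument is a Python dict,
-- which never has duplicate keys, so no Python input is excluded.
def Pre_reachable_from_entries_py (entry_ids : List String) (succ : List (String × List String)) : Prop :=
  (succ.map Prod.fst).Nodup
instance (entry_ids : List String) (succ : List (String × List String)) : Decidable (Pre_reachable_from_entries_py entry_ids succ) := by unfold Pre_reachable_from_entries_py; infer_instance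

def pvWitness_reachable_from_entries_py : List String × (List (String × List String)) :=
  (["a"], [("a", ["b", "c"]), ("b", ["a"])])

def Spec_reachable_from_entries_py (entry_ids : List String) (succ : List (String × List String)) (out : List String) : Prop := out = reachable_from_entries_py_alt entry_ids succ
instance (entry_ids : List String) (succ : List (String × List String)) (out : List String) : Decidable (Spec_reachable_from_entries_py entry_ids succ out) := by unfold Spec_reachable_from_entries_py; infer_instance

-- ===== CLAIM (what is proved, stated in full; the proofs are below) =====
def Claim_equal_reachable_from_entries_py : Prop := ∀ (entry_ids : List String) (succ : List (String × List String)), Dom_reachable_from_entries_py entry_ids succ → Pre_reachable_from_entries_py entry_ids succ → Spec_reachable_from_entries_py entry_ids succ (reachable_from_entries_py entry_ids succ)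

-- ===== LEMMAS AND PROOFS =====

-- reachability from the entry points along the successor map (dict lookup = first match)
inductive pvReach (entry_ids : List String) (succ : List (String × List String)) : String → Prop
  | entry {x : String} : x ∈ entry_ids → pvReach entry_ids succ x
  | step {n x : String} {vs : List String} : pvReach entry_ids succ n →
      (PySem.Dict.mk succ).get? n = some vs → x ∈ vs → pvReach entry_ids succ x

-- x ∈ Set / contains bridges used throughout
theorem pvMem_update (seen : PySem.Set String) (vs : List String) (y : String) :
    y ∈ PySem.Set.update seen vs ↔ y ∈ seen ∨ y ∈ vs := by
  have h := PySem.Set.mem_foldl_add (f := fun b : String => b) (l := vs) (s := seen) (y := y)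
  simp only [PySem.Set.update]
  constructor
  · intro hm; rcases h.mp hm with hy | ⟨b, hb, rfl⟩
    · exact Or.inl hy
    · exact Or.inr hb
  · intro hm; exact h.mpr (hm.imp id (fun hy => ⟨y, hy, rfl⟩))

theorem pvContains_iff (s : PySem.Set String) (x : String) :
    PySem.Set.contains s x = true ↔ x ∈ s := by
  simp [PySem.Set.contains, List.contains_iff_mem]

theorem pvBfs_sound (E : List String) (succ : List (String × List String)) :
    ∀ (seen : PySem.Set String) (dq : List String),
      (∀ y ∈ seen, pvReach E succ y) → (∀ y ∈ dq, pvReach E succ y) →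
      ∀ x ∈ pvBfs succ seen dq, pvReach E succ x := by
  intro seen dq
  induction seen, dq using pvBfs.induct succ with
  | case1 seen =>
    intro hs _ x hx
    exact hs x (by simpa [pvBfs] using hx)
  | case2 seen n rest h ih =>
    intro hs hd x hx
    rw [pvBfs, if_pos h] at hx
    exact ih hs (fun y hy => hd y (List.mem_cons_of_mem _ hy)) x hx
  | case3 seen n rest h ih =>
    intro hs hd x hx
    rw [pvBfs, if_neg h] at hx
    have hrn : pvReach E succ n := hd n List.mem_cons_self
    refine ih ?_ ?_ x hx
    · intro y hy
      rcases (PySem.Set.mem_add seen n y).mp hy with hy' | rfl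
      · exact hs y hy'
      · exact hrn
    · intro y hy
      rcases List.mem_append.mp hy with hy' | hy'
      · exact hd y (List.mem_cons_of_mem _ hy')
      · have hy2 : y ∈ (PySem.Dict.mk succ).getD n [] := (List.mem_filter.mp hy').1
        rcases hget : (PySem.Dict.mk succ).get? n with _ | vs
        · rw [PySem.Dict.getD_eq_get?_getD, hget] at hy2; simp at hy2
        · rw [PySem.Dict.getD_eq_get?_getD, hget] at hy2
          exact .step hrn hget hy2

theorem pvBfs_mem_of (succ : List (String × List String)) :
    ∀ (seen : PySem.Set String) (dq : List String),
      ∀ y, (y ∈ seen ∨ y ∈ dq) → y ∈ pvBfs succ seen dq := by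
  intro seen dq
  induction seen, dq using pvBfs.induct succ with
  | case1 seen =>
    intro y hy
    rw [pvBfs]
    rcases hy with hy | hy
    · exact hy
    · simp at hy
  | case2 seen n rest h ih =>
    intro y hy
    rw [pvBfs, if_pos h]
    refine ih y ?_
    rcases hy with hy | hy
    · exact Or.inl hy
    · rcases List.mem_cons.mp hy with rfl | hy'
      · exact Or.inl ((pvContains_iff seen y).mp h)
      · exact Or.inr hy'
  | case3 seen n rest h ih =>
    intro y hy
    rw [pvBfs, if_neg h]
    refine ih y ?_
    rcases hy with hy | hy
    · exact Or.inl ((PySem.Set.mem_add seen n y).mpr (Or.inl hy))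
    · rcases List.mem_cons.mp hy with rfl | hy'
      · exact Or.inl ((PySem.Set.mem_add seen y y).mpr (Or.inr rfl))
      · exact Or.inr (List.mem_append.mpr (Or.inl hy'))

theorem pvBfs_closed (succ : List (String × List String)) :
    ∀ (seen : PySem.Set String) (dq : List String),
      (∀ m ∈ seen, ∀ vs, (PySem.Dict.mk succ).get? m = some vs → ∀ s ∈ vs, s ∈ seen ∨ s ∈ dq) →
      ∀ m ∈ pvBfs succ seen dq, ∀ vs, (PySem.Dict.mk succ).get? m = some vs →
        ∀ s ∈ vs, s ∈ pvBfs succ seen dq := by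
  intro seen dq
  induction seen, dq using pvBfs.induct succ with
  | case1 seen =>
    intro hinv m hm vs hget s hs
    rw [pvBfs] at hm ⊢
    rcases hinv m hm vs hget s hs with h' | h'
    · exact h'
    · simp at h'
  | case2 seen n rest h ih =>
    intro hinv m hm vs hget s hs
    rw [pvBfs, if_pos h] at hm ⊢
    refine ih ?_ m hm vs hget s hs
    intro m' hm' vs' hget' s' hs'
    rcases hinv m' hm' vs' hget' s' hs' with h' | h'
    · exact Or.inl h'
    · rcases List.mem_cons.mp h' with rfl | h''
      · exact Or.inl ((pvContains_iff seen s').mp h)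
      · exact Or.inr h''
  | case3 seen n rest h ih =>
    intro hinv m hm vs hget s hs
    rw [pvBfs, if_neg h] at hm ⊢
    refine ih ?_ m hm vs hget s hs
    intro m' hm' vs' hget' s' hs'
    rcases (PySem.Set.mem_add seen n m').mp hm' with hm'' | rfl
    · rcases hinv m' hm'' vs' hget' s' hs' with h' | h'
      · exact Or.inl ((PySem.Set.mem_add seen n s').mpr (Or.inl h'))
      · rcases List.mem_cons.mp h' with rfl | h''
        · exact Or.inl ((PySem.Set.mem_add seen s' s').mpr (Or.inr rfl))
        · exact Or.inr (List.mem_append.mpr (Or.inl h''))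
    · by_cases hmem : s' ∈ PySem.Set.add seen m'
      · exact Or.inl hmem
      · refine Or.inr (List.mem_append.mpr (Or.inr ?_))
        refine List.mem_filter.mpr ⟨?_, ?_⟩
        · rw [PySem.Dict.getD_eq_get?_getD, hget']; exact hs'
        · simp only [Bool.not_eq_eq_eq_not, Bool.not_true]
          rw [← Bool.not_eq_true]
          intro hc
          exact hmem ((pvContains_iff _ s').mp hc)

theorem pvBfs_nodup (succ : List (String × List String)) :
    ∀ (seen : PySem.Set String) (dq : List String),
      seen.Nodup → (pvBfs succ seen dq).Nodup := by
  intro seen dq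
  induction seen, dq using pvBfs.induct succ with
  | case1 seen => intro h; rw [pvBfs]; exact h
  | case2 seen n rest h ih => intro hnd; rw [pvBfs, if_pos h]; exact ih hnd
  | case3 seen n rest h ih =>
    intro hnd; rw [pvBfs, if_neg h]; exact ih (PySem.Set.nodup_add seen n hnd)

theorem pvBfs_mem_iff (E : List String) (succ : List (String × List String)) :
    ∀ x, x ∈ pvBfs succ PySem.Set.empty E ↔ pvReach E succ x := by
  intro x
  constructor
  · intro hx
    refine pvBfs_sound E succ PySem.Set.empty E (fun y hy => ?_) (fun y hy => .entry hy) x hx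
    simp [PySem.Set.empty] at hy
  · intro hx
    induction hx with
    | entry hy => exact pvBfs_mem_of succ PySem.Set.empty E _ (Or.inr hy)
    | step _ hget hv ih =>
      refine pvBfs_closed succ PySem.Set.empty E (fun m hm => ?_) _ ih _ hget _ hv
      simp [PySem.Set.empty] at hm

theorem pvSweep_prefix (pairs : List (String × List String)) (seen : PySem.Set String) :
    ∀ y ∈ seen, y ∈ pvSweep pairs seen := by
  rcases pvSweep_append pairs seen with ⟨t, ht, _⟩
  intro y hy
  rw [ht]; exact List.mem_append.mpr (Or.inl hy)

theorem pvSweep_sound (E : List String) (succ : List (String × List String))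
    (hnd : (succ.map Prod.fst).Nodup) :
    ∀ (pairs : List (String × List String)), (∀ p ∈ pairs, p ∈ succ) →
    ∀ (seen : PySem.Set String), (∀ y ∈ seen, pvReach E succ y) →
    ∀ x ∈ pvSweep pairs seen, pvReach E succ x := by
  intro pairs
  induction pairs with
  | nil => intro _ seen hs x hx; simp only [pvSweep, List.foldl] at hx; exact hs x hx
  | cons kv rest ih =>
    intro hpairs seen hs x hx
    have hstep : pvSweep (kv :: rest) seen =
        pvSweep rest (if PySem.Set.contains seen kv.1 then PySem.Set.update seen kv.2 else seen) := by
      simp [pvSweep, List.foldl]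
    rw [hstep] at hx
    by_cases hv : PySem.Set.contains seen kv.1
    · rw [if_pos hv] at hx
      refine ih (fun p hp => hpairs p (List.mem_cons_of_mem _ hp)) _ ?_ x hx
      intro y hy
      rcases (pvMem_update seen kv.2 y).mp hy with hy' | hy'
      · exact hs y hy'
      · have hk : pvReach E succ kv.1 := hs kv.1 ((pvContains_iff seen kv.1).mp hv)
        have hmem : (kv.1, kv.2) ∈ succ := by
          have := hpairs kv List.mem_cons_self
          simpa using this
        have hget : (PySem.Dict.mk succ).get? kv.1 = some kv.2 :=
          PySem.Dict.get?_of_mem_items _ hmem (by rw [PySem.Dict.keys_mk]; exact hnd)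
        exact .step hk hget hy'
    · rw [if_neg hv] at hx
      exact ih (fun p hp => hpairs p (List.mem_cons_of_mem _ hp)) seen hs x hx

theorem pvSweep_closed_mem (pairs : List (String × List String)) :
    ∀ (seen : PySem.Set String) {k x : String} {vs : List String},
      k ∈ seen → (k, vs) ∈ pairs → x ∈ vs → x ∈ pvSweep pairs seen := by
  induction pairs with
  | nil => intro seen k x vs _ hkv _; simp at hkv
  | cons kv rest ih =>
    intro seen k x vs hk hkv hx
    have hstep : pvSweep (kv :: rest) seen =
        pvSweep rest (if PySem.Set.contains seen kv.1 then PySem.Set.update seen kv.2 else seen) := by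
      simp [pvSweep, List.foldl]
    rw [hstep]
    rcases List.mem_cons.mp hkv with rfl | hkv'
    · rw [if_pos ((pvContains_iff seen k).mpr hk)]
      exact pvSweep_prefix rest _ x ((pvMem_update seen vs x).mpr (Or.inr hx))
    · by_cases hv : PySem.Set.contains seen kv.1
      · rw [if_pos hv]
        exact ih _ ((pvMem_update seen kv.2 k).mpr (Or.inl hk)) hkv' hx
      · rw [if_neg hv]
        exact ih _ hk hkv' hx

theorem pvSweep_nodup (pairs : List (String × List String)) :
    ∀ (seen : PySem.Set String), seen.Nodup → (pvSweep pairs seen).Nodup := by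
  induction pairs with
  | nil => intro seen h; simpa [pvSweep] using h
  | cons kv rest ih =>
    intro seen h
    have hstep : pvSweep (kv :: rest) seen =
        pvSweep rest (if PySem.Set.contains seen kv.1 then PySem.Set.update seen kv.2 else seen) := by
      simp [pvSweep, List.foldl]
    rw [hstep]
    refine ih _ ?_
    split
    · exact PySem.Set.nodup_update seen kv.2 h
    · exact h

theorem pvSweep_fix_of_len (succ : List (String × List String)) (seen : PySem.Set String)
    (h : PySem.Set.len (pvSweep succ seen) = PySem.Set.len seen) : pvSweep succ seen = seen := by
  rcases pvSweep_append succ seen with ⟨t, ht, _⟩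
  rw [ht]
  have : t = [] := by
    rw [ht] at h
    simp [PySem.Set.len] at h
    exact h
  rw [this, List.append_nil]

theorem pvFix_sound (E : List String) (succ : List (String × List String))
    (hnd : (succ.map Prod.fst).Nodup) :
    ∀ (seen : PySem.Set String), (∀ y ∈ seen, pvReach E succ y) →
      ∀ x ∈ pvFix succ seen, pvReach E succ x := by
  intro seen
  induction seen using pvFix.induct succ with
  | case1 seen h => intro hs x hx; rw [pvFix, if_pos h] at hx; exact hs x hx
  | case2 seen h ih =>
    intro hs x hx
    rw [pvFix, if_neg h] at hx
    exact ih (pvSweep_sound E succ hnd succ (fun p hp => hp) seen hs) x hx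

theorem pvFix_mem_of (succ : List (String × List String)) :
    ∀ (seen : PySem.Set String), ∀ y ∈ seen, y ∈ pvFix succ seen := by
  intro seen
  induction seen using pvFix.induct succ with
  | case1 seen h => intro y hy; rw [pvFix, if_pos h]; exact hy
  | case2 seen h ih =>
    intro y hy
    rw [pvFix, if_neg h]
    exact ih y (pvSweep_prefix succ seen y hy)

theorem pvFix_closed (succ : List (String × List String)) :
    ∀ (seen : PySem.Set String), ∀ m ∈ pvFix succ seen, ∀ vs,
      (PySem.Dict.mk succ).get? m = some vs → ∀ s ∈ vs, s ∈ pvFix succ seen := by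
  intro seen
  induction seen using pvFix.induct succ with
  | case1 seen h =>
    intro m hm vs hget s hs
    rw [pvFix, if_pos h] at hm ⊢
    have hfix := pvSweep_fix_of_len succ seen h
    have hmem : (m, vs) ∈ succ := PySem.Dict.mem_items_of_get?_eq_some _ hget
    have := pvSweep_closed_mem succ seen hm hmem hs
    rwa [hfix] at this
  | case2 seen h ih =>
    intro m hm vs hget s hs
    rw [pvFix, if_neg h] at hm ⊢
    exact ih m hm vs hget s hs

theorem pvFix_nodup (succ : List (String × List String)) :
    ∀ (seen : PySem.Set String), seen.Nodup → (pvFix succ seen).Nodup := by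
  intro seen
  induction seen using pvFix.induct succ with
  | case1 seen h => intro hnd; rw [pvFix, if_pos h]; exact hnd
  | case2 seen h ih => intro hnd; rw [pvFix, if_neg h]; exact ih (pvSweep_nodup succ seen hnd)

theorem pvFix_mem_iff (E : List String) (succ : List (String × List String))
    (hnd : (succ.map Prod.fst).Nodup) :
    ∀ x, x ∈ pvFix succ (PySem.Set.ofList E) ↔ pvReach E succ x := by
  intro x
  constructor
  · intro hx
    exact pvFix_sound E succ hnd _
      (fun y hy => .entry ((PySem.Set.mem_ofList E y).mp hy)) x hx
  · intro hx
    induction hx with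
    | entry hy => exact pvFix_mem_of succ _ _ ((PySem.Set.mem_ofList E _).mpr hy)
    | step _ hget hv ih => exact pvFix_closed succ _ _ ih _ hget _ hv

-- ===== VERDICT (by name: the statement is the Claim_ definition above) =====
theorem reachable_from_entries_py_spec : Claim_equal_reachable_from_entries_py := by
  intro E succ _hdom hpre
  unfold Spec_reachable_from_entries_py reachable_from_entries_py reachable_from_entries_py_alt
  refine PySem.List.sorted_eq_sorted_of_perm _ _ _ (fun a b h => h) ?_
  refine (List.perm_ext_iff_of_nodup (pvBfs_nodup succ PySem.Set.empty E (by simp [PySem.Set.empty]))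
    (pvFix_nodup succ _ (PySem.Set.nodup_ofList E))).mpr ?_
  intro a
  rw [pvBfs_mem_iff E succ a, pvFix_mem_iff E succ hpre a]
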